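-- pv_equiv track=rewrite | github.com/adawkin/MEGL_polyform | polyformv1.py | isValidPolyform
-- ===== SOURCE A (Python) =====
-- def isValidPolyform(polyform):
--
--   strongly_connected = {polyform[0]}
--
--   working_poly = polyform[1:]
--
--   last_len = len(working_poly)
--   while len(working_poly) > 0:
--     for square in working_poly:
--
--       possible_neighbors = [(square[0], square[1] + 1, square[2]),
--       (square[0], square[1] - 1, square[2]),
--       (square[0] + 1, square[1], square[2]),
--       (square[0] - 1, square[1], square[2]),
--       (square[0], square[1], square[2] + 1),
--       (square[0], square[1], square[2] - 1)]
--       add = False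
--
--       for possible_neighbor in possible_neighbors:
--         if possible_neighbor in strongly_connected:
--
--           working_poly.remove(square)
--           strongly_connected.add(square)
--           break;
--     if last_len - len(working_poly) == 0:
--       return False
--     last_len = len(working_poly)
--
--   return True
-- ===== SOURCE B (Python) =====
-- def isValidPolyform(polyform):
--   first = polyform[0]
--   rest = polyform[1:]
--
--   # inverted neighbor index: 3-tuple -> squares that list it as a neighbor
--   index = {}
--   for sq in rest:
--     for nb in [(sq[0], sq[1] + 1, sq[2]),
--                (sq[0], sq[1] - 1, sq[2]),
--                (sq[0] + 1, sq[1], sq[2]),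
--                (sq[0] - 1, sq[1], sq[2]),
--                (sq[0], sq[1], sq[2] + 1),
--                (sq[0], sq[1], sq[2] - 1)]:
--       index.setdefault(nb, []).append(sq)
--
--   # flood fill from the first cube
--   reached = set()
--   frontier = [first]
--   while frontier:
--     v = frontier.pop()
--     for sq in index.get(v, []):
--       if sq not in reached:
--         reached.add(sq)
--         frontier.append(sq)
--
--   return all(sq in reached for sq in rest)
-- ===== Notes on version B (the rewrite author's own statement) =====
-- stated objective: alternative
-- what changed: A repeatedly rescans the whole worklist (removing squares whose neighbor is already connected) until a pass makes no progress; B builds an inverted neighbor index (dict from candidate-neighbor position to squares) once and flood-fills from the first cube, checking at the end that every remaining square was reached.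
import Mathlib
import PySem

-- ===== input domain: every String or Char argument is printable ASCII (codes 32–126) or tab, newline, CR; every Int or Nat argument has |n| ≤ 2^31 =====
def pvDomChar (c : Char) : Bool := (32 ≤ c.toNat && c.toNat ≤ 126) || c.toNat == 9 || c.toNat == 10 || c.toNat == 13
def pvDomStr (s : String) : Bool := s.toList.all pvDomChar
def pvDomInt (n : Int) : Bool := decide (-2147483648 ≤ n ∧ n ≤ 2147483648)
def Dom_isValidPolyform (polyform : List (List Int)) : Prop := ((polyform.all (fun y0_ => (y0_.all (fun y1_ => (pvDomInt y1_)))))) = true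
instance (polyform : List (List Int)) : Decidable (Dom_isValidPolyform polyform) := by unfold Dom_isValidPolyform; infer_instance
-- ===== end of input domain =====

-- B replaces A's repeated full rescans of the worklist by a one-shot inverted neighbor index and a
-- flood fill from the first cube (a structurally different algorithm; same value everywhere in Pre_).

-- ===== PORT A =====

-- one 'for square in working_poly' pass, k = the iterator's next index (removal during
-- iteration skips the following element, exactly as in CPython); fuel only guards
-- totality: the loop runs at most wp.length - k more steps, so fuel = wp.length + 1
-- at the call site is never exhausted
def pvPassA (fuel : Nat) (sc : PySem.Set (List Int)) (wp : List (List Int)) (k : Nat) :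
    PySem.Set (List Int) × List (List Int) :=
  match fuel with
  | 0 => (sc, wp)
  | fuel + 1 =>
    if h : k < wp.length then
      -- possible_neighbors: square[0], square[1], square[2] indexed inline
      -- (IndexError on squares shorter than 3 is excluded by Pre_)
      -- 'for possible_neighbor in …: if … in strongly_connected: remove; add; break'
      if [[PySem.List.pyGetD wp[k] 0 0, PySem.List.pyGetD wp[k] 1 0 + 1, PySem.List.pyGetD wp[k] 2 0],
          [PySem.List.pyGetD wp[k] 0 0, PySem.List.pyGetD wp[k] 1 0 - 1, PySem.List.pyGetD wp[k] 2 0],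
          [PySem.List.pyGetD wp[k] 0 0 + 1, PySem.List.pyGetD wp[k] 1 0, PySem.List.pyGetD wp[k] 2 0],
          [PySem.List.pyGetD wp[k] 0 0 - 1, PySem.List.pyGetD wp[k] 1 0, PySem.List.pyGetD wp[k] 2 0],
          [PySem.List.pyGetD wp[k] 0 0, PySem.List.pyGetD wp[k] 1 0, PySem.List.pyGetD wp[k] 2 0 + 1],
          [PySem.List.pyGetD wp[k] 0 0, PySem.List.pyGetD wp[k] 1 0, PySem.List.pyGetD wp[k] 2 0 - 1]].any
            (fun nb => PySem.Set.contains sc nb) then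
        pvPassA fuel (PySem.Set.add sc wp[k]) ((PySem.List.remove? wp wp[k]).getD wp) (k + 1)
      else
        pvPassA fuel sc wp (k + 1)
    else (sc, wp)

-- the 'while len(working_poly) > 0' loop; lastLen is Python's last_len; fuel only guards
-- totality (every iteration that recurses strictly shrinks working_poly, so
-- fuel = wp.length + 1 at the call site is never exhausted)
def pvLoopA (fuel : Nat) (sc : PySem.Set (List Int)) (wp : List (List Int))
    (lastLen : Nat) : Bool :=
  match fuel with
  | 0 => true
  | fuel + 1 =>
    if wp.length > 0 then
      if (lastLen : Int) - (((pvPassA (wp.length + 1) sc wp 0).2.length : Nat) : Int) = 0 then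
        false
      else
        pvLoopA fuel (pvPassA (wp.length + 1) sc wp 0).1 (pvPassA (wp.length + 1) sc wp 0).2
          (pvPassA (wp.length + 1) sc wp 0).2.length
    else true

def isValidPolyform (polyform : List (List Int)) : Bool :=
  -- polyform[0]: IndexError on the empty list, excluded by Pre_
  let sc : PySem.Set (List Int) := PySem.Set.ofList [polyform.headD []]
  let wp := PySem.List.slice polyform (some 1) none
  pvLoopA (wp.length + 1) sc wp wp.length

-- ===== PORT B =====

-- B helper: the six candidate neighbours of a square (sq[0..2]; short tail squares excluded by Pre_)
def pvNbrsB (sq : List Int) : List (List Int) :=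
  let a := PySem.List.pyGetD sq 0 0
  let b := PySem.List.pyGetD sq 1 0
  let c := PySem.List.pyGetD sq 2 0
  [[a, b + 1, c], [a, b - 1, c], [a + 1, b, c], [a - 1, b, c], [a, b, c + 1], [a, b, c - 1]]

-- index.setdefault(nb, []).append(sq)  ==  index[nb] = index.get(nb, []) + [sq]
def pvIndexB (rest : List (List Int)) : PySem.Dict (List Int) (List (List Int)) :=
  rest.foldl
    (fun d sq => (pvNbrsB sq).foldl (fun d nb => d.modify nb [] (fun l => l ++ [sq])) d)
    PySem.Dict.empty

-- body of one BFS iteration: 'for sq in index.get(v, []): if sq not in reached: …'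
def pvStepB (index : PySem.Dict (List Int) (List (List Int)))
    (reached : PySem.Set (List Int)) (v : List Int) (front : List (List Int)) :
    PySem.Set (List Int) × List (List Int) :=
  (index.getD v []).foldl
    (fun p sq => if PySem.Set.contains p.1 sq then p else (PySem.Set.add p.1 sq, p.2 ++ [sq]))
    (reached, front)

-- 'while frontier: v = frontier.pop(); …'  (fuel is only a totality guard; rest.length + 1
-- pops always suffice since each push after the first records a fresh reached square)
def pvBfsB (index : PySem.Dict (List Int) (List (List Int))) :
    Nat → PySem.Set (List Int) → List (List Int) → PySem.Set (List Int)
  | 0, reached, _ => reached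
  | fuel + 1, reached, frontier =>
    if h : frontier ≠ [] then
      let v := frontier.getLast h
      let p := pvStepB index reached v frontier.dropLast
      pvBfsB index fuel p.1 p.2
    else reached

def isValidPolyform_alt (polyform : List (List Int)) : Bool :=
  -- polyform[0]: IndexError on the empty list, excluded by Pre_
  let first := polyform.headD []
  let rest := PySem.List.slice polyform (some 1) none
  let index := pvIndexB rest
  let reached := pvBfsB index (rest.length + 1) PySem.Set.empty [first]
  rest.all (fun sq => PySem.Set.contains reached sq)

-- ===== PRECONDITION & SPEC =====

-- Pre_ excludes exactly the inputs where Python A raises: IndexError on the empty list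
-- (polyform[0]) and IndexError on a non-first square shorter than 3 (square[2]).
def Pre_isValidPolyform (polyform : List (List Int)) : Prop :=
  polyform ≠ [] ∧ ∀ s ∈ polyform.tail, 3 ≤ s.length
instance (polyform : List (List Int)) : Decidable (Pre_isValidPolyform polyform) := by
  unfold Pre_isValidPolyform; infer_instance

def pvWitness_isValidPolyform : List (List Int) := [[0, 0, 0], [0, 0, 1], [1, 0, 1]]

def Spec_isValidPolyform (polyform : List (List Int)) (out : Bool) : Prop :=
  out = isValidPolyform_alt polyform
instance (polyform : List (List Int)) (out : Bool) : Decidable (Spec_isValidPolyform polyform out) := by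
  unfold Spec_isValidPolyform; infer_instance

-- ===== CLAIM (what is proved, stated in full; the proofs are below) =====
def Claim_equal_isValidPolyform : Prop := ∀ (polyform : List (List Int)), Dom_isValidPolyform polyform → Pre_isValidPolyform polyform → Spec_isValidPolyform polyform (isValidPolyform polyform)

-- ===== LEMMAS AND PROOFS =====

-- s is connected to the seed cube: some neighbour position of s holds the seed or an
-- already-connected square.  Both programs return 'all of rest satisfies pvReach'.
inductive pvReach (first : List Int) (rest : List (List Int)) : List Int → Prop
  | fromFirst (s : List Int) : s ∈ rest → first ∈ pvNbrsB s → pvReach first rest s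
  | fromReached (s v : List Int) : s ∈ rest → v ∈ pvNbrsB s → pvReach first rest v →
      pvReach first rest s

theorem pvNodup_length_le {α : Type} (l l' : List α) [DecidableEq α]
    (h : l.Nodup) (hsub : ∀ x ∈ l, x ∈ l') : l.length ≤ l'.length := by
  have h1 : l.toFinset.card = l.length := List.toFinset_card_of_nodup h
  have h2 : l.toFinset ⊆ l'.toFinset := by
    intro x hx
    simp only [List.mem_toFinset] at *
    exact hsub x hx
  have h3 := Finset.card_le_card h2
  have h4 := l'.toFinset_card_le
  omega

-- ---- A side ----

-- helper lemma about working_poly.remove(square) used by the pass lemmas below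
theorem pvPassA_helper_len {α : Type} [BEq α] [LawfulBEq α] (wp : List α) (x : α)
    (hx : x ∈ wp) : ((PySem.List.remove? wp x).getD wp).length + 1 = wp.length := by
  rw [PySem.List.remove?_eq_some_erase wp x hx]
  have h1 : 0 < wp.length := List.length_pos_of_mem hx
  have h2 : (wp.erase x).length = wp.length - 1 := List.length_erase_of_mem hx
  simp only [Option.getD_some]
  omega


theorem pvPassA_step (fuel : Nat) (sc : PySem.Set (List Int)) (wp : List (List Int))
    (k : Nat) (h : k < wp.length) :
    pvPassA (fuel + 1) sc wp k =
      if (pvNbrsB wp[k]).any (fun nb => PySem.Set.contains sc nb) then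
        pvPassA fuel (PySem.Set.add sc wp[k]) ((PySem.List.remove? wp wp[k]).getD wp) (k + 1)
      else pvPassA fuel sc wp (k + 1) := by
  rw [pvPassA, dif_pos h]
  rfl

theorem pvPassA_stop (fuel : Nat) (sc : PySem.Set (List Int)) (wp : List (List Int))
    (k : Nat) (h : ¬ k < wp.length) :
    pvPassA (fuel + 1) sc wp k = (sc, wp) := by
  rw [pvPassA, dif_neg h]

theorem pvPassA_len_le (fuel : Nat) (sc : PySem.Set (List Int)) (wp : List (List Int))
    (k : Nat) : (pvPassA fuel sc wp k).2.length ≤ wp.length := by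
  induction fuel generalizing sc wp k with
  | zero => exact Nat.le_refl _
  | succ fuel ih =>
      by_cases h : k < wp.length
      · rw [pvPassA_step fuel sc wp k h]
        by_cases hany : (pvNbrsB wp[k]).any (fun nb => PySem.Set.contains sc nb) = true
        · rw [if_pos hany]
          have h1 := pvPassA_helper_len wp wp[k] (List.getElem_mem h)
          have h2 := ih (PySem.Set.add sc wp[k]) ((PySem.List.remove? wp wp[k]).getD wp) (k + 1)
          omega
        · rw [if_neg hany]
          exact ih sc wp (k + 1)
      · rw [pvPassA_stop fuel sc wp k h]

theorem pvPassA_spec (first : List Int) (rest : List (List Int)) (fuel : Nat)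
    (sc : PySem.Set (List Int)) (wp : List (List Int)) (k : Nat)
    (hsc : ∀ x ∈ sc, x = first ∨ pvReach first rest x)
    (hwp : ∀ s ∈ wp, s ∈ rest)
    (hfk : wp.length ≤ fuel + k) :
    (∀ x ∈ (pvPassA fuel sc wp k).1, x ∈ sc ∨ pvReach first rest x) ∧
    (∀ x ∈ sc, x ∈ (pvPassA fuel sc wp k).1) ∧
    (∀ s ∈ (pvPassA fuel sc wp k).2, s ∈ wp) ∧
    (∀ s, (s ∈ sc ∨ s ∈ wp) → s ∈ (pvPassA fuel sc wp k).1 ∨ s ∈ (pvPassA fuel sc wp k).2) ∧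
    (∀ s ∈ wp, s ∉ (pvPassA fuel sc wp k).2 → pvReach first rest s) ∧
    ((pvPassA fuel sc wp k).2.length = wp.length →
       (pvPassA fuel sc wp k).1 = sc ∧ (pvPassA fuel sc wp k).2 = wp ∧
       ∀ s ∈ wp.drop k, ∀ v ∈ pvNbrsB s, PySem.Set.contains sc v = false) := by
  induction fuel generalizing sc wp k with
  | zero =>
      refine ⟨fun x hx => Or.inl hx, fun x hx => hx, fun s hs => hs,
        fun s hs => hs.elim (fun h' => Or.inl h') (fun h' => Or.inr h'), ?_, ?_⟩
      · exact fun s hs hns => absurd hs hns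
      · intro _
        refine ⟨rfl, rfl, ?_⟩
        have hnil : wp.drop k = [] := List.drop_of_length_le (by omega)
        rw [hnil]
        intro s hs
        exact absurd hs List.not_mem_nil
  | succ fuel ih =>
      by_cases h : k < wp.length
      · rw [pvPassA_step fuel sc wp k h]
        have hmem : wp[k] ∈ wp := List.getElem_mem h
        by_cases hany : (pvNbrsB wp[k]).any (fun nb => PySem.Set.contains sc nb) = true
        · rw [if_pos hany]
          have herase : (PySem.List.remove? wp wp[k]).getD wp = wp.erase wp[k] := by
            rw [PySem.List.remove?_eq_some_erase wp wp[k] hmem, Option.getD_some]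
          simp only [List.any_eq_true] at hany
          obtain ⟨v, hvmem, hvc⟩ := hany
          have hvsc : v ∈ sc := (PySem.Set.contains_iff sc v).mp hvc
          have hreach : pvReach first rest wp[k] := by
            rcases hsc v hvsc with hvf | hvr
            · exact pvReach.fromFirst wp[k] (hwp wp[k] hmem) (hvf ▸ hvmem)
            · exact pvReach.fromReached wp[k] v (hwp wp[k] hmem) hvmem hvr
          rw [herase]
          have hsc' : ∀ x ∈ PySem.Set.add sc wp[k], x = first ∨ pvReach first rest x := by
            intro x hx
            rcases (PySem.Set.mem_add sc wp[k] x).mp hx with hx' | hx'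
            · exact hsc x hx'
            · exact Or.inr (hx' ▸ hreach)
          have hwp' : ∀ s ∈ wp.erase wp[k], s ∈ rest := fun s hs =>
            hwp s (List.mem_of_mem_erase hs)
          have hlenerase : (wp.erase wp[k]).length = wp.length - 1 :=
            List.length_erase_of_mem hmem
          obtain ⟨C1, C2, C3, C4, C5, C7⟩ :=
            ih (PySem.Set.add sc wp[k]) (wp.erase wp[k]) (k + 1) hsc' hwp' (by omega)
          have hmemadd : ∀ x ∈ sc, x ∈ PySem.Set.add sc wp[k] := fun x hx =>
            (PySem.Set.mem_add sc wp[k] x).mpr (Or.inl hx)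
          have hsqadd : wp[k] ∈ PySem.Set.add sc wp[k] :=
            (PySem.Set.mem_add sc wp[k] wp[k]).mpr (Or.inr rfl)
          refine ⟨?_, ?_, ?_, ?_, ?_, ?_⟩
          · intro x hx
            rcases C1 x hx with hx' | hx'
            · rcases (PySem.Set.mem_add sc wp[k] x).mp hx' with h'' | h''
              · exact Or.inl h''
              · exact Or.inr (h'' ▸ hreach)
            · exact Or.inr hx'
          · exact fun x hx => C2 x (hmemadd x hx)
          · exact fun s hs => List.mem_of_mem_erase (C3 s hs)
          · intro s hs
            rcases hs with hs | hs
            · exact C4 s (Or.inl (hmemadd s hs))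
            · by_cases hsq : s = wp[k]
              · exact C4 s (Or.inl (hsq ▸ hsqadd))
              · exact C4 s (Or.inr ((List.mem_erase_of_ne hsq).mpr hs))
          · intro s hs hns
            by_cases hsq : s = wp[k]
            · exact hsq ▸ hreach
            · exact C5 s ((List.mem_erase_of_ne hsq).mpr hs) hns
          · intro hlen
            exfalso
            have h1 := pvPassA_len_le fuel (PySem.Set.add sc wp[k]) (wp.erase wp[k]) (k + 1)
            have h3 : 0 < wp.length := List.length_pos_of_mem hmem
            omega
        · rw [if_neg hany]
          obtain ⟨C1, C2, C3, C4, C5, C7⟩ := ih sc wp (k + 1) hsc hwp (by omega)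
          refine ⟨C1, C2, C3, C4, C5, ?_⟩
          intro hlen
          obtain ⟨E1, E2, E3⟩ := C7 hlen
          refine ⟨E1, E2, ?_⟩
          have hdrop : wp.drop k = wp[k] :: wp.drop (k + 1) := List.drop_eq_getElem_cons h
          have hfalse : ∀ nb ∈ pvNbrsB wp[k], PySem.Set.contains sc nb = false := by
            simpa using List.any_eq_false.mp (Bool.of_not_eq_true hany)
          intro s hs v hv
          rw [hdrop] at hs
          rcases List.mem_cons.mp hs with hs' | hs'
          · exact hfalse v (hs' ▸ hv)
          · exact E3 s hs' v hv
      · rw [pvPassA_stop fuel sc wp k h]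
        refine ⟨fun x hx => Or.inl hx, fun x hx => hx, fun s hs => hs,
          fun s hs => hs.elim (fun h' => Or.inl h') (fun h' => Or.inr h'), ?_, ?_⟩
        · exact fun s hs hns => absurd hs hns
        · intro _
          refine ⟨rfl, rfl, ?_⟩
          have hnil : wp.drop k = [] := List.drop_of_length_le (Nat.le_of_not_lt h)
          rw [hnil]
          intro s hs
          exact absurd hs List.not_mem_nil

theorem pvReach_subset_sc (first : List Int) (rest : List (List Int))
    (sc : PySem.Set (List Int)) (wp : List (List Int))
    (hfirst : first ∈ sc)
    (hcover : ∀ s ∈ rest, s ∈ sc ∨ s ∈ wp)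
    (hclosed : ∀ s ∈ wp, ∀ v ∈ pvNbrsB s, PySem.Set.contains sc v = false) :
    ∀ x, pvReach first rest x → x ∈ sc := by
  intro x hx
  induction hx with
  | fromFirst s hs hf =>
      rcases hcover s hs with h1 | h1
      · exact h1
      · exfalso
        have hcl := hclosed s h1 first hf
        have hc := (PySem.Set.contains_iff sc first).mpr hfirst
        rw [hcl] at hc
        exact Bool.false_ne_true hc
  | fromReached s v hs hv _ ihv =>
      rcases hcover s hs with h1 | h1
      · exact h1
      · exfalso
        have hcl := hclosed s h1 v hv
        have hc := (PySem.Set.contains_iff sc v).mpr ihv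
        rw [hcl] at hc
        exact Bool.false_ne_true hc

theorem pvLoopA_spec (first : List Int) (rest : List (List Int)) :
    ∀ (fuel : Nat) (wp : List (List Int)) (sc : PySem.Set (List Int)),
    wp.length < fuel →
    (∀ x ∈ sc, x = first ∨ pvReach first rest x) →
    (∀ s ∈ wp, s ∈ rest) →
    first ∈ sc →
    (∀ s ∈ rest, s ∈ sc ∨ s ∈ wp) →
    (pvLoopA fuel sc wp wp.length = true ↔ ∀ s ∈ wp, pvReach first rest s) := by
  intro fuel
  induction fuel with
  | zero =>
      intro wp sc hlt
      exact absurd hlt (Nat.not_lt_zero _)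
  | succ fuel ihn =>
      intro wp sc hlt hsc hwp hfirst hcover
      rw [pvLoopA]
      by_cases hpos : wp.length > 0
      · simp only [if_pos hpos]
        obtain ⟨C1, C2, C3, C4, C5, C7⟩ :=
          pvPassA_spec first rest (wp.length + 1) sc wp 0 hsc hwp (by omega)
        have hle := pvPassA_len_le (wp.length + 1) sc wp 0
        by_cases hstop :
            ((wp.length : Int) - ((pvPassA (wp.length + 1) sc wp 0).2.length : Int) = 0)
        · simp only [if_pos hstop]
          have hlen2 : (pvPassA (wp.length + 1) sc wp 0).2.length = wp.length := by omega
          obtain ⟨E1, E2, E3⟩ := C7 hlen2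
          simp only [List.drop_zero] at E3
          constructor
          · intro hfalse
            exact absurd hfalse (by simp)
          · intro hall
            exfalso
            obtain ⟨s0, hs0⟩ := List.exists_mem_of_length_pos hpos
            have hsub := pvReach_subset_sc first rest sc wp hfirst hcover E3
            have hr := hall s0 hs0
            cases hr with
            | fromFirst s hs hf =>
                have hcl := E3 s0 hs0 first hf
                have hc := (PySem.Set.contains_iff sc first).mpr hfirst
                rw [hcl] at hc
                exact Bool.false_ne_true hc
            | fromReached s v hs hv hrv =>
                have hcl := E3 s0 hs0 v hv
                have hc := (PySem.Set.contains_iff sc v).mpr (hsub v hrv)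
                rw [hcl] at hc
                exact Bool.false_ne_true hc
        · simp only [if_neg hstop]
          have hlt2 : (pvPassA (wp.length + 1) sc wp 0).2.length < wp.length := by omega
          have ihres := ihn (pvPassA (wp.length + 1) sc wp 0).2
            (pvPassA (wp.length + 1) sc wp 0).1 (by omega)
            (fun x hx => (C1 x hx).elim (hsc x) Or.inr)
            (fun s hs => hwp s (C3 s hs))
            (C2 first hfirst)
            (fun s hs => (hcover s hs).elim
              (fun h' => C4 s (Or.inl h')) (fun h' => C4 s (Or.inr h')))
          rw [ihres]
          constructor
          · intro ht s hs
            by_cases hsp : s ∈ (pvPassA (wp.length + 1) sc wp 0).2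
            · exact ht s hsp
            · exact C5 s hs hsp
          · exact fun hall s hs => hall s (C3 s hs)
      · simp only [if_neg hpos]
        have hnil : wp = [] := List.eq_nil_of_length_eq_zero (by omega)
        subst hnil
        simp

theorem pvA_iff (p : List (List Int)) :
    isValidPolyform p = true ↔ ∀ s ∈ p.tail, pvReach (p.headD []) p.tail s := by
  unfold isValidPolyform
  rw [PySem.List.slice_from_one]
  have hsc : PySem.Set.ofList [p.headD []] = [p.headD []] := rfl
  rw [hsc]
  exact pvLoopA_spec (p.headD []) p.tail (p.tail.length + 1) p.tail [p.headD []]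
    (Nat.lt_succ_self _)
    (fun x hx => Or.inl (List.mem_singleton.mp hx))
    (fun s hs => hs)
    (List.mem_singleton.mpr rfl)
    (fun s hs => Or.inr hs)

-- ---- B side ----

theorem pvIndexB_mem (rest : List (List Int)) (v sq : List Int) :
    sq ∈ (pvIndexB rest).getD v [] ↔ sq ∈ rest ∧ v ∈ pvNbrsB sq := by
  have aux : ∀ (sq0 : List Int) (ns : List (List Int))
      (d : PySem.Dict (List Int) (List (List Int))),
      sq ∈ (ns.foldl (fun d nb => d.modify nb [] (fun l => l ++ [sq0])) d).getD v [] ↔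
        sq ∈ d.getD v [] ∨ (sq = sq0 ∧ v ∈ ns) := by
    intro sq0 ns
    induction ns with
    | nil => intro d; simp
    | cons nb ns ih =>
        intro d
        rw [List.foldl_cons, ih, PySem.Dict.getD_modify]
        by_cases hv : v = nb
        · subst hv
          simp only [if_pos, true_or, List.mem_append, List.mem_cons]
          tauto
        · simp only [if_neg hv, List.mem_cons]
          tauto
  have main : ∀ (rs : List (List Int)) (d : PySem.Dict (List Int) (List (List Int))),
      sq ∈ (rs.foldl
          (fun d sq' => (pvNbrsB sq').foldl
            (fun d nb => d.modify nb [] (fun l => l ++ [sq'])) d) d).getD v [] ↔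
        sq ∈ d.getD v [] ∨ (sq ∈ rs ∧ v ∈ pvNbrsB sq) := by
    intro rs
    induction rs with
    | nil => intro d; simp
    | cons sq0 rs ih =>
        intro d
        rw [List.foldl_cons, ih, aux sq0 (pvNbrsB sq0) d]
        constructor
        · rintro ((hd | ⟨rfl, hnb⟩) | ⟨hrs, hnb⟩)
          · exact Or.inl hd
          · exact Or.inr ⟨List.mem_cons_self, hnb⟩
          · exact Or.inr ⟨List.mem_cons_of_mem _ hrs, hnb⟩
        · rintro (hd | ⟨hm, hnb⟩)
          · exact Or.inl (Or.inl hd)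
          · rcases List.mem_cons.mp hm with rfl | hrs
            · exact Or.inl (Or.inr ⟨rfl, hnb⟩)
            · exact Or.inr ⟨hrs, hnb⟩
  unfold pvIndexB
  rw [main]
  simp [PySem.Dict.getD_empty]

theorem pvStepB_spec (index : PySem.Dict (List Int) (List (List Int)))
    (reached : PySem.Set (List Int)) (v : List Int) (front : List (List Int)) :
    (∀ x ∈ (pvStepB index reached v front).1, x ∈ reached ∨ x ∈ index.getD v []) ∧
    (∀ x ∈ reached, x ∈ (pvStepB index reached v front).1) ∧
    (∀ sq ∈ index.getD v [], sq ∈ (pvStepB index reached v front).1) ∧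
    (∀ x ∈ (pvStepB index reached v front).2, x ∈ front ∨ x ∈ (pvStepB index reached v front).1) ∧
    (∀ x ∈ (pvStepB index reached v front).1, x ∈ reached ∨ x ∈ (pvStepB index reached v front).2) ∧
    (∀ x ∈ front, x ∈ (pvStepB index reached v front).2) ∧
    ((pvStepB index reached v front).2.length + reached.length
       = front.length + (pvStepB index reached v front).1.length) ∧
    (reached.Nodup → (pvStepB index reached v front).1.Nodup) := by
  have aux : ∀ (l : List (List Int)) (reached : PySem.Set (List Int))
      (front : List (List Int)),
      (∀ x ∈ (l.foldl (fun p sq => if PySem.Set.contains p.1 sq then p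
          else (PySem.Set.add p.1 sq, p.2 ++ [sq])) (reached, front)).1,
        x ∈ reached ∨ x ∈ l) ∧
      (∀ x ∈ reached, x ∈ (l.foldl (fun p sq => if PySem.Set.contains p.1 sq then p
          else (PySem.Set.add p.1 sq, p.2 ++ [sq])) (reached, front)).1) ∧
      (∀ sq ∈ l, sq ∈ (l.foldl (fun p sq => if PySem.Set.contains p.1 sq then p
          else (PySem.Set.add p.1 sq, p.2 ++ [sq])) (reached, front)).1) ∧
      (∀ x ∈ (l.foldl (fun p sq => if PySem.Set.contains p.1 sq then p
          else (PySem.Set.add p.1 sq, p.2 ++ [sq])) (reached, front)).2,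
        x ∈ front ∨ x ∈ (l.foldl (fun p sq => if PySem.Set.contains p.1 sq then p
          else (PySem.Set.add p.1 sq, p.2 ++ [sq])) (reached, front)).1) ∧
      (∀ x ∈ (l.foldl (fun p sq => if PySem.Set.contains p.1 sq then p
          else (PySem.Set.add p.1 sq, p.2 ++ [sq])) (reached, front)).1,
        x ∈ reached ∨ x ∈ (l.foldl (fun p sq => if PySem.Set.contains p.1 sq then p
          else (PySem.Set.add p.1 sq, p.2 ++ [sq])) (reached, front)).2) ∧
      (∀ x ∈ front, x ∈ (l.foldl (fun p sq => if PySem.Set.contains p.1 sq then p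
          else (PySem.Set.add p.1 sq, p.2 ++ [sq])) (reached, front)).2) ∧
      ((l.foldl (fun p sq => if PySem.Set.contains p.1 sq then p
          else (PySem.Set.add p.1 sq, p.2 ++ [sq])) (reached, front)).2.length
          + reached.length
        = front.length + (l.foldl (fun p sq => if PySem.Set.contains p.1 sq then p
          else (PySem.Set.add p.1 sq, p.2 ++ [sq])) (reached, front)).1.length) ∧
      (reached.Nodup → (l.foldl (fun p sq => if PySem.Set.contains p.1 sq then p
          else (PySem.Set.add p.1 sq, p.2 ++ [sq])) (reached, front)).1.Nodup) := by
    intro l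
    induction l with
    | nil =>
        intro reached front
        exact ⟨fun x hx => Or.inl hx, fun x hx => hx, fun sq hsq => absurd hsq List.not_mem_nil,
          fun x hx => Or.inl hx, fun x hx => Or.inl hx, fun x hx => hx, rfl, fun h => h⟩
    | cons sq0 l ih =>
        intro reached front
        rw [List.foldl_cons]
        by_cases hc : PySem.Set.contains reached sq0 = true
        · have hm : sq0 ∈ reached := (PySem.Set.contains_iff reached sq0).mp hc
          simp only [hc, if_pos]
          obtain ⟨S1, S2, S3, S4, S5, S6, S7, S8⟩ := ih reached front
          refine ⟨?_, S2, ?_, S4, S5, S6, S7, S8⟩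
          · exact fun x hx => (S1 x hx).elim Or.inl (fun h' => Or.inr (List.mem_cons_of_mem _ h'))
          · intro sq hsq
            rcases List.mem_cons.mp hsq with rfl | h'
            · exact S2 sq hm
            · exact S3 sq h'
        · have hm : sq0 ∉ reached := fun h' =>
            hc ((PySem.Set.contains_iff reached sq0).mpr h')
          simp only [hc, Bool.false_eq_true, if_false]
          obtain ⟨S1, S2, S3, S4, S5, S6, S7, S8⟩ :=
            ih (PySem.Set.add reached sq0) (front ++ [sq0])
          have haddmem : ∀ x ∈ reached, x ∈ PySem.Set.add reached sq0 := fun x hx =>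
            (PySem.Set.mem_add reached sq0 x).mpr (Or.inl hx)
          have hsq0add : sq0 ∈ PySem.Set.add reached sq0 :=
            (PySem.Set.mem_add reached sq0 sq0).mpr (Or.inr rfl)
          have haddlen : (PySem.Set.add reached sq0).length = reached.length + 1 := by
            rw [PySem.Set.add_of_not_mem hm, List.length_append, List.length_singleton]
          refine ⟨?_, ?_, ?_, ?_, ?_, ?_, ?_, ?_⟩
          · intro x hx
            rcases S1 x hx with hx' | hx'
            · rcases (PySem.Set.mem_add reached sq0 x).mp hx' with h' | h'
              · exact Or.inl h'
              · exact Or.inr (h' ▸ List.mem_cons_self)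
            · exact Or.inr (List.mem_cons_of_mem _ hx')
          · exact fun x hx => S2 x (haddmem x hx)
          · intro sq hsq
            rcases List.mem_cons.mp hsq with rfl | h'
            · exact S2 sq hsq0add
            · exact S3 sq h'
          · intro x hx
            rcases S4 x hx with hx' | hx'
            · rcases List.mem_append.mp hx' with h' | h'
              · exact Or.inl h'
              · exact Or.inr (S2 x ((List.mem_singleton.mp h') ▸ hsq0add))
            · exact Or.inr hx'
          · intro x hx
            rcases S5 x hx with hx' | hx'
            · rcases (PySem.Set.mem_add reached sq0 x).mp hx' with h' | h'
              · exact Or.inl h'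
              · exact Or.inr (S6 x (List.mem_append.mpr (Or.inr (h' ▸ List.mem_singleton.mpr rfl))))
            · exact Or.inr hx'
          · exact fun x hx => S6 x (List.mem_append.mpr (Or.inl hx))
          · rw [List.length_append, List.length_singleton] at S7
            omega
          · intro hnd
            exact S8 (PySem.Set.nodup_add reached sq0 hnd)
  exact aux (index.getD v []) reached front

theorem pvBfs_closed (first : List Int) (rest : List (List Int))
    (index : PySem.Dict (List Int) (List (List Int)))
    (hidx : ∀ v sq, sq ∈ index.getD v [] ↔ sq ∈ rest ∧ v ∈ pvNbrsB sq)
    (reached : PySem.Set (List Int))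
    (h3 : ∀ v, (v = first ∨ v ∈ reached) → ∀ sq ∈ index.getD v [], sq ∈ reached) :
    ∀ s, pvReach first rest s → s ∈ reached := by
  intro s hs
  induction hs with
  | fromFirst s hsr hf =>
      exact h3 first (Or.inl rfl) s ((hidx first s).mpr ⟨hsr, hf⟩)
  | fromReached s v hsr hv _ ihv =>
      exact h3 v (Or.inr ihv) s ((hidx v s).mpr ⟨hsr, hv⟩)

theorem pvBfsB_spec (first : List Int) (rest : List (List Int))
    (index : PySem.Dict (List Int) (List (List Int)))
    (hidx : ∀ v sq, sq ∈ index.getD v [] ↔ sq ∈ rest ∧ v ∈ pvNbrsB sq) :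
    ∀ (fuel : Nat) (reached : PySem.Set (List Int)) (frontier : List (List Int)),
    (∀ x ∈ reached, pvReach first rest x) →
    (∀ x ∈ frontier, x = first ∨ x ∈ reached) →
    (∀ v, (v = first ∨ v ∈ reached) → v ∉ frontier → ∀ sq ∈ index.getD v [], sq ∈ reached) →
    (∀ x ∈ reached, x ∈ rest) →
    reached.Nodup →
    frontier.length + (rest.length - reached.length) ≤ fuel →
    (∀ x ∈ pvBfsB index fuel reached frontier, pvReach first rest x) ∧
    (∀ s, pvReach first rest s → s ∈ pvBfsB index fuel reached frontier) := by
  intro fuel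
  induction fuel with
  | zero =>
      intro reached frontier h1 h2 h3 h4 h5 hfuel
      have hfr : frontier = [] := List.eq_nil_of_length_eq_zero (by omega)
      subst hfr
      refine ⟨h1, ?_⟩
      exact pvBfs_closed first rest index hidx reached
        (fun v hv => h3 v hv List.not_mem_nil)
  | succ fuel ih =>
      intro reached frontier h1 h2 h3 h4 h5 hfuel
      by_cases h : frontier ≠ []
      · obtain ⟨S1, S2, S3, S4, S5, S6, S7, S8⟩ :=
          pvStepB_spec index reached (frontier.getLast h) frontier.dropLast
        have hfr : frontier = frontier.dropLast ++ [frontier.getLast h] :=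
          (List.dropLast_append_getLast h).symm
        have hv_stat : frontier.getLast h = first ∨ frontier.getLast h ∈ reached :=
          h2 (frontier.getLast h) (List.getLast_mem h)
        have h1' : ∀ x ∈ (pvStepB index reached (frontier.getLast h) frontier.dropLast).1,
            pvReach first rest x := by
          intro x hx
          rcases S1 x hx with hx' | hx'
          · exact h1 x hx'
          · obtain ⟨hxr, hvn⟩ := (hidx (frontier.getLast h) x).mp hx'
            rcases hv_stat with hvf | hvm
            · exact pvReach.fromFirst x hxr (hvf ▸ hvn)
            · exact pvReach.fromReached x (frontier.getLast h) hxr hvn (h1 _ hvm)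
        have h2' : ∀ x ∈ (pvStepB index reached (frontier.getLast h) frontier.dropLast).2,
            x = first ∨ x ∈ (pvStepB index reached (frontier.getLast h) frontier.dropLast).1 := by
          intro x hx
          rcases S4 x hx with hx' | hx'
          · have hxf : x ∈ frontier := by
              rw [hfr]; exact List.mem_append.mpr (Or.inl hx')
            rcases h2 x hxf with h' | h'
            · exact Or.inl h'
            · exact Or.inr (S2 x h')
          · exact Or.inr hx'
        have h3' : ∀ v', (v' = first ∨
              v' ∈ (pvStepB index reached (frontier.getLast h) frontier.dropLast).1) →
            v' ∉ (pvStepB index reached (frontier.getLast h) frontier.dropLast).2 →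
            ∀ sq ∈ index.getD v' [],
              sq ∈ (pvStepB index reached (frontier.getLast h) frontier.dropLast).1 := by
          intro v' hv' hnp sq hsq
          by_cases hvv : v' = frontier.getLast h
          · exact S3 sq (hvv ▸ hsq)
          · have hv'old : v' = first ∨ v' ∈ reached := by
              rcases hv' with hvf | hvm
              · exact Or.inl hvf
              · rcases S5 v' hvm with h' | h'
                · exact Or.inr h'
                · exact absurd h' hnp
            have hnf : v' ∉ frontier := by
              rw [hfr]
              intro hmem
              rcases List.mem_append.mp hmem with h' | h'
              · exact hnp (S6 v' h')
              · exact hvv (List.mem_singleton.mp h')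
            exact S2 sq (h3 v' hv'old hnf sq hsq)
        have h4' : ∀ x ∈ (pvStepB index reached (frontier.getLast h) frontier.dropLast).1,
            x ∈ rest := by
          intro x hx
          rcases S1 x hx with hx' | hx'
          · exact h4 x hx'
          · exact ((hidx (frontier.getLast h) x).mp hx').1
        have h5' := S8 h5
        have hb1 : (pvStepB index reached (frontier.getLast h) frontier.dropLast).1.length
            ≤ rest.length := pvNodup_length_le _ rest h5' h4'
        have hb2 : reached.length
            ≤ (pvStepB index reached (frontier.getLast h) frontier.dropLast).1.length :=
          pvNodup_length_le reached _ h5 S2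
        have hld : frontier.dropLast.length = frontier.length - 1 := List.length_dropLast
        have hlp : 0 < frontier.length := List.length_pos_of_ne_nil h
        have hfuel' : (pvStepB index reached (frontier.getLast h) frontier.dropLast).2.length
            + (rest.length
              - (pvStepB index reached (frontier.getLast h) frontier.dropLast).1.length)
            ≤ fuel := by omega
        have heq : pvBfsB index (fuel + 1) reached frontier
            = pvBfsB index fuel
                (pvStepB index reached (frontier.getLast h) frontier.dropLast).1
                (pvStepB index reached (frontier.getLast h) frontier.dropLast).2 := by
          rw [pvBfsB, dif_pos h]
        rw [heq]
        exact ih _ _ h1' h2' h3' h4' h5' hfuel'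
      · have hfr : frontier = [] := not_not.mp h
        subst hfr
        have heq : pvBfsB index (fuel + 1) reached [] = reached := by
          rw [pvBfsB, dif_neg (by simp)]
        rw [heq]
        refine ⟨h1, ?_⟩
        exact pvBfs_closed first rest index hidx reached
          (fun v hv => h3 v hv List.not_mem_nil)

theorem pvB_iff (p : List (List Int)) :
    isValidPolyform_alt p = true ↔ ∀ s ∈ p.tail, pvReach (p.headD []) p.tail s := by
  unfold isValidPolyform_alt
  rw [PySem.List.slice_from_one]
  obtain ⟨HA, HB⟩ := pvBfsB_spec (p.headD []) p.tail (pvIndexB p.tail)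
    (fun v sq => pvIndexB_mem p.tail v sq)
    (p.tail.length + 1) PySem.Set.empty [p.headD []]
    (fun x hx => absurd hx List.not_mem_nil)
    (fun x hx => Or.inl (List.mem_singleton.mp hx))
    (fun v hv hnf sq hsq => by
      rcases hv with rfl | hv
      · exact absurd (List.mem_singleton.mpr rfl) hnf
      · exact absurd hv List.not_mem_nil)
    (fun x hx => absurd hx List.not_mem_nil)
    List.nodup_nil
    (by simp [PySem.Set.empty]; omega)
  rw [List.all_eq_true]
  constructor
  · intro hall s hs
    exact HA s ((PySem.Set.contains_iff _ s).mp (hall s hs))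
  · intro hall s hs
    exact (PySem.Set.contains_iff _ s).mpr (HB s (hall s hs))

-- ===== VERDICT (by name: the statement is the Claim_ definition above) =====
theorem isValidPolyform_spec : Claim_equal_isValidPolyform := by
  intro p _ _
  unfold Spec_isValidPolyform
  rw [Bool.eq_iff_iff, pvA_iff, pvB_iff]
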